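-- pv_equiv track=rewrite | github.com/findingsimple/skills | sprint-pulse/fetch.py | identify_active_columns
-- ===== SOURCE A (Python) =====
-- def identify_active_columns(board_config):
--     """Identify column names that represent active work (between To Do and Done)."""
--     if not board_config:
--         return set()
--     column_names = [c["name"] for c in board_config]
--     active = set()
--     in_active_zone = False
--     for name in column_names:
--         lower = name.lower().strip()
--         if lower in ("to do", "todo", "backlog", "open"):
--             in_active_zone = True
--             continue
--         if lower in ("done", "closed", "resolved", "completed"):
--             break
--         if in_active_zone:
--             active.add(name)
--     # Fallback: if no active columns detected, use common names
--     if not active: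
--         for name in column_names:
--             lower = name.lower().strip()
--             if any(kw in lower for kw in ("progress", "review", "testing", "qa")):
--                 active.add(name)
--     return active
-- ===== SOURCE B (Python) =====
-- def identify_active_columns(board_config):
--     """Identify column names that represent active work (between To Do and Done)."""
--     if not board_config:
--         return set()
--     names = [c["name"] for c in board_config]
--     START = ("to do", "todo", "backlog", "open")
--     DONE = ("done", "closed", "resolved", "completed")
--     end = next((i for i, n in enumerate(names) if n.lower().strip() in DONE), len(names))
--     start = next((i for i in range(end) if names[i].lower().strip() in START), None)
--     active = set()
--     if start is not None:
--         active = {n for n in names[start + 1:end] if n.lower().strip() not in START}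
--     if not active:
--         active = {n for n in names
--                   if any(kw in n.lower().strip() for kw in ("progress", "review", "testing", "qa"))}
--     return active
-- ===== Notes on version B (the rewrite author's own statement) =====
-- stated objective: alternative
-- what changed: Replaces A's single stateful scan (in_active_zone flag with continue/break) by a boundary-index decomposition: find the first done-column index (end) and the first start-column index before it, then build the active set by a filtered set comprehension over the slice names[start+1:end]; the substring-keyword fallback becomes a set comprehension too.
import Mathlib
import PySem

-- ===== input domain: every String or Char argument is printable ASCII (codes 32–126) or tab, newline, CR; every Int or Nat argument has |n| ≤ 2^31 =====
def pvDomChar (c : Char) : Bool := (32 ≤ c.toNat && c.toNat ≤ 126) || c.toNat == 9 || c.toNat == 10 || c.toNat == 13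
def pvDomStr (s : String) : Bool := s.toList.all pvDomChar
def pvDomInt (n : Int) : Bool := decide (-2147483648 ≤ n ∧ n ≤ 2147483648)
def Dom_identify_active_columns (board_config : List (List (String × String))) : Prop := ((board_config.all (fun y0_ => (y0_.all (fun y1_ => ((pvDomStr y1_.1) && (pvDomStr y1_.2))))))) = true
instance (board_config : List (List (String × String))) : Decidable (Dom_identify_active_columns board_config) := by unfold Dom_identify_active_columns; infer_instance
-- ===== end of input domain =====

-- B replaces A's stateful flag/break scan by a boundary-index decomposition (first done index,
-- first start index before it, filtered slice between them); same cost, different structure.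


-- shared vocabulary (identical literal tuples in both Pythons)
def iacNorm (s : String) : String := PySem.Str.strip (PySem.Str.lower s)
def iacStart : List String := ["to do", "todo", "backlog", "open"]
def iacDone : List String := ["done", "closed", "resolved", "completed"]
def iacKw : List String := ["progress", "review", "testing", "qa"]
-- c["name"]: first match in the association list; default "" is never used under Pre_ (exact there)
def iacName (c : List (String × String)) : String := ((c.find? (fun p => p.1 == "name")).map (fun p => p.2)).getD ""

-- ===== PORT A =====
-- A's for-loop with in_active_zone / continue / break, as structural recursion on the names
def iacLoopA : List String → PySem.Set String → Bool → PySem.Set String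
  | [], active, _ => active
  | n :: rest, active, inZone =>
    if iacNorm n ∈ iacStart then iacLoopA rest active true
    else if iacNorm n ∈ iacDone then active
    else if inZone then iacLoopA rest (PySem.Set.add active n) inZone else iacLoopA rest active inZone

-- A's fallback for-loop with set.add
def iacFallbackA (names : List String) (active : PySem.Set String) : PySem.Set String :=
  names.foldl (fun acc n =>
    if iacKw.any (fun kw => PySem.Str.isIn kw (iacNorm n)) then PySem.Set.add acc n else acc) active

def identify_active_columns (board_config : List (List (String × String))) : List String :=
  if board_config = [] then PySem.Set.empty else
    let column_names := board_config.map iacName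
    let active := iacLoopA column_names PySem.Set.empty false
    if active = [] then iacFallbackA column_names active else active

-- ===== PORT B =====
def identify_active_columns_alt (board_config : List (List (String × String))) : List String :=
  if board_config = [] then PySem.Set.empty else
    let names := board_config.map iacName
    -- end = next((i for i, n in enumerate(names) if norm in DONE), len(names))
    let e := (names.findIdx? (fun n => decide (iacNorm n ∈ iacDone))).getD names.length
    -- start = next((i for i in range(end) if norm(names[i]) in START), None)
    let s? := (names.take e).findIdx? (fun n => decide (iacNorm n ∈ iacStart))
    let active :=
      match s? with
      | none => PySem.Set.empty
      | some s =>
        PySem.Set.ofList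
          ((PySem.List.slice names (some ((s : Int) + 1)) (some (e : Int))).filter
            (fun n => decide (iacNorm n ∉ iacStart)))
    if active = [] then
      PySem.Set.ofList (names.filter (fun n => iacKw.any (fun kw => PySem.Str.isIn kw (iacNorm n))))
    else active

-- ===== PRECONDITION & SPEC =====
-- Pre_ excludes exactly the inputs where some column dict has no "name" key: Python A raises KeyError there.
def Pre_identify_active_columns (board_config : List (List (String × String))) : Prop :=
  (board_config.all (fun c => c.any (fun p => p.1 == "name"))) = true
instance (board_config : List (List (String × String))) : Decidable (Pre_identify_active_columns board_config) := by unfold Pre_identify_active_columns; infer_instance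
def pvWitness_identify_active_columns : (List (List (String × String))) :=
  [[("name", "To Do")], [("name", "In Progress")], [("name", "Done")]]
def Spec_identify_active_columns (board_config : List (List (String × String))) (out : List String) : Prop := out = identify_active_columns_alt board_config
instance (board_config : List (List (String × String))) (out : List String) : Decidable (Spec_identify_active_columns board_config out) := by unfold Spec_identify_active_columns; infer_instance

-- ===== CLAIM (what is proved, stated in full; the proofs are below) =====
def Claim_equal_identify_active_columns : Prop := ∀ (board_config : List (List (String × String))), Dom_identify_active_columns board_config → Pre_identify_active_columns board_config → Spec_identify_active_columns board_config (identify_active_columns board_config)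

-- ===== LEMMAS AND PROOFS =====

-- the start- and done-keyword sets are disjoint
lemma iac_start_not_done {n : String} (h : iacNorm n ∈ iacStart) : iacNorm n ∉ iacDone := by
  have hall : ∀ s ∈ iacStart, s ∉ iacDone := by decide
  exact hall _ h

-- a conditional set.add loop is Set.ofList of the filtered list (from any accumulator)
lemma foldl_add_if (p : String → Bool) (xs : List String) (acc : PySem.Set String) :
    xs.foldl (fun a n => if p n then PySem.Set.add a n else a) acc
      = (xs.filter p).foldl PySem.Set.add acc := by
  induction xs generalizing acc with
  | nil => rfl
  | cons x xs ih =>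
    simp only [List.foldl, List.filter]
    by_cases h : p x = true
    · simp [h, ih]
    · simp [eq_false_of_ne_true h, ih]

-- slice names[s+1:e] is drop/take
lemma iac_sliceB (names : List String) (s e : Nat) :
    PySem.List.slice names (some ((s : Int) + 1)) (some (e : Int))
      = (names.drop (s + 1)).take (e - (s + 1)) := by
  have h := PySem.List.slice_natCast names (s + 1) e
  push_cast at h
  exact h

-- take up to the first done index = takeWhile not-done
lemma take_findIdx?_eq_takeWhile (xs : List String) :
    xs.take ((xs.findIdx? (fun n => decide (iacNorm n ∈ iacDone))).getD xs.length)
      = xs.takeWhile (fun n => decide (iacNorm n ∉ iacDone)) := by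
  induction xs with
  | nil => rfl
  | cons x xs ih =>
    by_cases h : iacNorm x ∈ iacDone
    · simp [List.findIdx?_cons, h, List.takeWhile_cons]
    · have h' : decide (iacNorm x ∈ iacDone) = false := by simpa using h
      rw [List.findIdx?_cons, List.takeWhile_cons]
      simp only [h', cond_false, decide_not, Bool.not_false, if_true]
      cases hfi : xs.findIdx? (fun n => decide (iacNorm n ∈ iacDone)) with
      | none =>
        rw [hfi] at ih
        simp only [Option.getD_none] at ih
        simp [ih, decide_not]
      | some j =>
        rw [hfi] at ih
        simp only [Option.getD_some] at ih
        simp [ih, decide_not]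

-- A's loop in the active zone collects the non-start names up to the first done name
lemma iacLoopA_zone (xs : List String) (acc : PySem.Set String) :
    iacLoopA xs acc true
      = ((xs.takeWhile (fun n => decide (iacNorm n ∉ iacDone))).filter
          (fun n => decide (iacNorm n ∉ iacStart))).foldl PySem.Set.add acc := by
  induction xs generalizing acc with
  | nil => rfl
  | cons n xs ih =>
    by_cases hs : iacNorm n ∈ iacStart
    · have hd := iac_start_not_done hs
      simp [iacLoopA, hs, hd, ih]
    · by_cases hd : iacNorm n ∈ iacDone
      · simp [iacLoopA, hs, hd]
      · simp [iacLoopA, hs, hd, ih]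

-- B's active set, as a function of the name list
def iacActiveB (names : List String) : PySem.Set String :=
  let e := (names.findIdx? (fun n => decide (iacNorm n ∈ iacDone))).getD names.length
  match (names.take e).findIdx? (fun n => decide (iacNorm n ∈ iacStart)) with
  | none => PySem.Set.empty
  | some s =>
    PySem.Set.ofList
      ((PySem.List.slice names (some ((s : Int) + 1)) (some (e : Int))).filter
        (fun n => decide (iacNorm n ∉ iacStart)))

-- drop/take description of B's zone when the start marker sits at index s of names.take e
lemma iacActiveB_some (names : List String) {s : Nat}
    (h : (names.take ((names.findIdx? (fun n => decide (iacNorm n ∈ iacDone))).getD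
            names.length)).findIdx? (fun n => decide (iacNorm n ∈ iacStart)) = some s) :
    iacActiveB names
      = PySem.Set.ofList
          (((names.drop (s + 1)).take
              ((names.findIdx? (fun n => decide (iacNorm n ∈ iacDone))).getD names.length - (s + 1))).filter
            (fun n => decide (iacNorm n ∉ iacStart))) := by
  unfold iacActiveB
  simp only [h, iac_sliceB]

-- main lemma: A's scan computes B's boundary-index set
lemma iacLoopA_eq_activeB (names : List String) :
    iacLoopA names PySem.Set.empty false = iacActiveB names := by
  induction names with
  | nil => rfl
  | cons n xs ih =>
    by_cases hs : iacNorm n ∈ iacStart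
    · -- first column is a start marker: the zone is the rest up to the first done column
      have hd := iac_start_not_done hs
      have hd' : (decide (iacNorm n ∈ iacDone)) = false := by simpa using hd
      have hs' : (decide (iacNorm n ∈ iacStart)) = true := by simpa using hs
      have hloop : iacLoopA (n :: xs) PySem.Set.empty false = iacLoopA xs PySem.Set.empty true := by
        simp [iacLoopA, hs]
      have he : ((n :: xs).findIdx? (fun m => decide (iacNorm m ∈ iacDone))).getD (n :: xs).length
          = ((xs.findIdx? (fun m => decide (iacNorm m ∈ iacDone))).getD xs.length) + 1 := by
        rw [List.findIdx?_cons]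
        simp only [hd']
        cases hfi : xs.findIdx? (fun m => decide (iacNorm m ∈ iacDone)) <;> simp [List.length_cons]
      set e := (xs.findIdx? (fun m => decide (iacNorm m ∈ iacDone))).getD xs.length with hedef
      have hfs : ((n :: xs).take (((n :: xs).findIdx? (fun m => decide (iacNorm m ∈ iacDone))).getD
            (n :: xs).length)).findIdx? (fun m => decide (iacNorm m ∈ iacStart)) = some 0 := by
        rw [he, List.take_succ_cons, List.findIdx?_cons, hs']
        rfl
      rw [hloop, iacLoopA_zone, iacActiveB_some _ hfs, he]
      simp only [List.drop_succ_cons, List.drop_zero, Nat.add_sub_cancel]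
      have htk : xs.take e = xs.takeWhile (fun m => decide (iacNorm m ∉ iacDone)) :=
        take_findIdx?_eq_takeWhile xs
      rw [htk, PySem.Set.ofList_eq_foldl]
      rfl
    · by_cases hd : iacNorm n ∈ iacDone
      · -- first column is done: A returns the empty set, B's end = 0
        have hd' : (decide (iacNorm n ∈ iacDone)) = true := by simpa using hd
        simp [iacLoopA, hs, hd, iacActiveB, List.findIdx?_cons, hd']
      · -- ordinary first column before any marker: both ignore it
        have hd' : (decide (iacNorm n ∈ iacDone)) = false := by simpa using hd
        have hs' : (decide (iacNorm n ∈ iacStart)) = false := by simpa using hs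
        have hloop : iacLoopA (n :: xs) PySem.Set.empty false = iacLoopA xs PySem.Set.empty false := by
          simp [iacLoopA, hs, hd]
        have he : ((n :: xs).findIdx? (fun m => decide (iacNorm m ∈ iacDone))).getD (n :: xs).length
            = ((xs.findIdx? (fun m => decide (iacNorm m ∈ iacDone))).getD xs.length) + 1 := by
          rw [List.findIdx?_cons]
          simp only [hd']
          cases hfi : xs.findIdx? (fun m => decide (iacNorm m ∈ iacDone)) <;> simp [List.length_cons]
        set e := (xs.findIdx? (fun m => decide (iacNorm m ∈ iacDone))).getD xs.length with hedef
        have htcons : (n :: xs).take (e + 1) = n :: xs.take e := List.take_succ_cons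
        cases hsi : (xs.take e).findIdx? (fun m => decide (iacNorm m ∈ iacStart)) with
        | none =>
          have hfs : ((n :: xs).take (((n :: xs).findIdx? (fun m => decide (iacNorm m ∈ iacDone))).getD
                (n :: xs).length)).findIdx? (fun m => decide (iacNorm m ∈ iacStart)) = none := by
            rw [he, htcons, List.findIdx?_cons, hs']
            simp [hsi]
          have hB : iacActiveB (n :: xs) = PySem.Set.empty := by
            unfold iacActiveB
            simp only [hfs]
          have hB' : iacActiveB xs = PySem.Set.empty := by
            unfold iacActiveB
            simp only [← hedef, hsi]
          rw [hloop, ih, hB, hB']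
        | some s =>
          have hfs : ((n :: xs).take (((n :: xs).findIdx? (fun m => decide (iacNorm m ∈ iacDone))).getD
                (n :: xs).length)).findIdx? (fun m => decide (iacNorm m ∈ iacStart)) = some (s + 1) := by
            rw [he, htcons, List.findIdx?_cons, hs']
            simp [hsi]
          rw [hloop, ih, iacActiveB_some _ hfs, iacActiveB_some _ (by rw [← hedef, hsi])]
          rw [he]
          simp only [List.drop_succ_cons, Nat.add_sub_add_right]
          rfl

-- the two fallback computations agree
lemma iacFallback_eq (names : List String) :
    iacFallbackA names PySem.Set.empty
      = PySem.Set.ofList (names.filter (fun n => iacKw.any (fun kw => PySem.Str.isIn kw (iacNorm n)))) := by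
  unfold iacFallbackA
  rw [foldl_add_if, PySem.Set.ofList_eq_foldl]
  rfl

-- ===== VERDICT (by name: the statement is the Claim_ definition above) =====
theorem identify_active_columns_spec : Claim_equal_identify_active_columns := by
  intro bc _ _
  unfold Spec_identify_active_columns identify_active_columns identify_active_columns_alt
  by_cases hbc : bc = []
  · rw [if_pos hbc, if_pos hbc]
  · rw [if_neg hbc, if_neg hbc]
    show (if iacLoopA (bc.map iacName) PySem.Set.empty false = [] then
            iacFallbackA (bc.map iacName) (iacLoopA (bc.map iacName) PySem.Set.empty false)
          else iacLoopA (bc.map iacName) PySem.Set.empty false)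
        = (if iacActiveB (bc.map iacName) = [] then
            PySem.Set.ofList ((bc.map iacName).filter
              (fun n => iacKw.any (fun kw => PySem.Str.isIn kw (iacNorm n))))
          else iacActiveB (bc.map iacName))
    rw [iacLoopA_eq_activeB]
    by_cases hz : iacActiveB (bc.map iacName) = []
    · rw [if_pos hz, if_pos hz, hz]
      exact iacFallback_eq (bc.map iacName)
    · rw [if_neg hz, if_neg hz]
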